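-- pv_equiv track=rewrite | github.com/GHOUSEPASHAA/python | Arrays.py | contains_two_elements
-- ===== SOURCE A (Python) =====
-- def contains_two_elements(arr, elem1, elem2):
--     found_elem1 = found_elem2 = False
--     for num in arr:
--         if num == elem1:
--             found_elem1 = True
--         if num == elem2:
--             found_elem2 = True
--     return found_elem1 and found_elem2
-- ===== SOURCE B (Python) =====
-- def contains_two_elements(arr, elem1, elem2):
--     arr = list(arr)
--     return elem1 in arr and elem2 in arr
-- ===== Notes on version B (the rewrite author's own statement) =====
-- stated objective: idiomatic
-- what changed: Replaces the single-pass loop maintaining two boolean accumulators with two builtin membership tests (elem1 in arr and elem2 in arr), each its own short-circuiting scan.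
import Mathlib
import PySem

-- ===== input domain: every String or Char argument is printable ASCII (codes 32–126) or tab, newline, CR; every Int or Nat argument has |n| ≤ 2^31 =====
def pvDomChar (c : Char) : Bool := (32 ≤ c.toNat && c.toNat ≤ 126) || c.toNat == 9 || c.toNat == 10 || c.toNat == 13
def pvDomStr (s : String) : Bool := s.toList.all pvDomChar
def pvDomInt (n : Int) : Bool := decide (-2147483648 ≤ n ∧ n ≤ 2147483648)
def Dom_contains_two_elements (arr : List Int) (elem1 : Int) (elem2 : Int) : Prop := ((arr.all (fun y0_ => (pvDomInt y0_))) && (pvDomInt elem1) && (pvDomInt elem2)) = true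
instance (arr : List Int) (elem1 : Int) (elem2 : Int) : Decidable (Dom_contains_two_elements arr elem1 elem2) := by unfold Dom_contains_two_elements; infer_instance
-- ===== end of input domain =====

-- B replaces A's single-pass loop with two boolean accumulators by two membership tests (idiomatic; same cost).

-- ===== PORT A =====
-- single left-to-right pass, state = (found_elem1, found_elem2), both branches checked on each element
def contains_two_elements (arr : List Int) (elem1 : Int) (elem2 : Int) : Bool :=
  let st := arr.foldl (fun (st : Bool × Bool) num =>
    let st1 := if num == elem1 then (true, st.2) else st
    if num == elem2 then (st1.1, true) else st1) (false, false)
  st.1 && st.2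

-- ===== PORT B =====
-- two membership tests, exactly as Source B's `elem1 in arr and elem2 in arr`
def contains_two_elements_alt (arr : List Int) (elem1 : Int) (elem2 : Int) : Bool :=
  arr.contains elem1 && arr.contains elem2

-- ===== PRECONDITION & SPEC =====
def Spec_contains_two_elements (arr : List Int) (elem1 : Int) (elem2 : Int) (out : Bool) : Prop := out = contains_two_elements_alt arr elem1 elem2
instance (arr : List Int) (elem1 : Int) (elem2 : Int) (out : Bool) : Decidable (Spec_contains_two_elements arr elem1 elem2 out) := by unfold Spec_contains_two_elements; infer_instance

-- ===== CLAIM (what is proved, stated in full; the proofs are below) =====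
def Claim_equal_contains_two_elements : Prop := ∀ (arr : List Int) (elem1 : Int) (elem2 : Int), Dom_contains_two_elements arr elem1 elem2 → Spec_contains_two_elements arr elem1 elem2 (contains_two_elements arr elem1 elem2)

-- ===== LEMMAS AND PROOFS =====
theorem cte_beq_comm (u v : Int) : (u == v) = decide (v = u) := by
  by_cases huv : u = v
  · subst huv; simp
  · have h2 : ¬ v = u := fun e => huv e.symm
    simp [huv, h2]

-- one step of A's loop body on an explicit state pair
theorem cte_step (elem1 elem2 x : Int) (a b : Bool) :
    (let st1 := if (x == elem1) then (true, (a, b).2) else (a, b)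
     if (x == elem2) then (st1.1, true) else st1)
    = (a || (x == elem1), b || (x == elem2)) := by
  by_cases h1 : x = elem1 <;> by_cases h2 : x = elem2 <;>
    simp [h1, h2] <;> split_ifs <;> simp_all

-- invariant of A's fold: final state = (a || elem1 ∈ arr, b || elem2 ∈ arr)
theorem cte_fold_inv (elem1 elem2 : Int) (arr : List Int) (a b : Bool) :
    arr.foldl (fun (st : Bool × Bool) num =>
      let st1 := if num == elem1 then (true, st.2) else st
      if num == elem2 then (st1.1, true) else st1) (a, b)
    = (a || arr.contains elem1, b || arr.contains elem2) := by
  induction arr generalizing a b with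
  | nil => simp
  | cons x xs ih =>
    rw [List.foldl_cons, cte_step, ih]
    simp [Bool.or_assoc, cte_beq_comm]

-- ===== VERDICT (by name: the statement is the Claim_ definition above) =====
theorem contains_two_elements_spec : Claim_equal_contains_two_elements := by
  intro arr elem1 elem2 _
  unfold Spec_contains_two_elements contains_two_elements contains_two_elements_alt
  rw [cte_fold_inv]
  simp
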